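-- pv_equiv track=rewrite | github.com/akikuno/DAJIN2 | src/DAJIN2/utils/cssplits_handler.py | has_consecutive_matches
-- ===== SOURCE A (Python) =====
-- def has_consecutive_matches(tags: list[str], n: int = 10) -> bool:
--     count = 0
--     for tag in tags:
--         if tag.startswith("="):
--             count += 1
--             if count >= n:
--                 return True
--         else:
--             count = 0
--     return False
-- ===== SOURCE B (Python) =====
-- def has_consecutive_matches(tags: list[str], n: int = 10) -> bool:
--     # Decompose into maximal runs of same match-key, then test the match runs.
--     runs = []
--     i = 0
--     while i < len(tags):
--         k = tags[i].startswith("=")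
--         j = i + 1
--         while j < len(tags) and tags[j].startswith("=") == k:
--             j += 1
--         runs.append((k, j - i))
--         i = j
--     return any(k and length >= n for k, length in runs)
-- ===== Notes on version B (the rewrite author's own statement) =====
-- stated objective: alternative
-- what changed: Replaced the running-counter-with-reset early-exit scan by a two-phase runs decomposition: first split the list into maximal runs of equal match-key, then return whether any match-keyed run has length >= n.
import Mathlib
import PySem

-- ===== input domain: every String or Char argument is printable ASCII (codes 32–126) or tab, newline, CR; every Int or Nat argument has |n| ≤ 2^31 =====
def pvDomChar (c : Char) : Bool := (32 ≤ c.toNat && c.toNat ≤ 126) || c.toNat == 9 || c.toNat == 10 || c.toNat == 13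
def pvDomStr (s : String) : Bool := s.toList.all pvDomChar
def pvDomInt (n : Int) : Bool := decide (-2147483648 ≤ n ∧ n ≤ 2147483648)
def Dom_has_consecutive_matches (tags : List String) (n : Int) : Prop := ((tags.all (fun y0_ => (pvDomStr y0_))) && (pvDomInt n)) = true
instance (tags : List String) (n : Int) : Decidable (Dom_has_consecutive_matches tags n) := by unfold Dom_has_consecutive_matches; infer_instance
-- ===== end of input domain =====

-- B replaces A's running counter-with-reset scan by a runs decomposition (split into
-- maximal equal-key runs, then test the match runs): an alternative of the same cost.


-- ===== PORT A =====
-- the for-loop with counter `count` and early return, as structural recursion over tags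
def hcmGo (n : Int) : Int → List String → Bool
  | _, [] => false
  | count, t :: ts =>
    if PySem.Str.startswith t "=" then
      if count + 1 ≥ n then true else hcmGo n (count + 1) ts
    else hcmGo n 0 ts

def has_consecutive_matches (tags : List String) (n : Int) : Bool :=
  hcmGo n 0 tags

-- ===== PORT B =====
-- phase 1 of Source B: build the list of maximal runs (key, length); the inner while
-- scan over equal keys is the takeWhile/dropWhile split
def hcmRuns : List String → List (Bool × Int)
  | [] => []
  | t :: ts =>
    let k := PySem.Str.startswith t "="
    (k, 1 + ((ts.takeWhile (fun s => PySem.Str.startswith s "=" == k)).length : Int))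
      :: hcmRuns (ts.dropWhile (fun s => PySem.Str.startswith s "=" == k))
termination_by l => l.length
decreasing_by
  simp only [List.length_cons]
  exact Nat.lt_succ_of_le (List.length_dropWhile_le _ _)

-- phase 2 of Source B: any(k and length >= n)
def has_consecutive_matches_alt (tags : List String) (n : Int) : Bool :=
  (hcmRuns tags).any (fun p => p.1 && decide (p.2 ≥ n))

-- ===== PRECONDITION & SPEC =====
def Spec_has_consecutive_matches (tags : List String) (n : Int) (out : Bool) : Prop := out = has_consecutive_matches_alt tags n
instance (tags : List String) (n : Int) (out : Bool) : Decidable (Spec_has_consecutive_matches tags n out) := by unfold Spec_has_consecutive_matches; infer_instance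

-- ===== CLAIM (what is proved, stated in full; the proofs are below) =====
def Claim_equal_has_consecutive_matches : Prop := ∀ (tags : List String) (n : Int), Dom_has_consecutive_matches tags n → Spec_has_consecutive_matches tags n (has_consecutive_matches tags n)

-- ===== LEMMAS AND PROOFS =====

-- running A's loop over a block of consecutive match tags
theorem hcmGo_match_run (n : Int) (run rest : List String)
    (h : ∀ s ∈ run, PySem.Str.startswith s "=" = true) (c : Int) :
    hcmGo n c (run ++ rest) =
      (decide (1 ≤ run.length ∧ n ≤ c + run.length) || hcmGo n (c + run.length) rest) := by
  induction run generalizing c with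
  | nil => simp
  | cons t rs ih =>
    have ht : PySem.Str.startswith t "=" = true := h t (by simp)
    rw [List.cons_append]
    simp only [hcmGo, ht, if_true]
    rw [ih (fun s hs => h s (List.mem_cons_of_mem _ hs))]
    simp only [List.length_cons]
    push_cast
    rw [show c + ((rs.length : Int) + 1) = c + 1 + (rs.length : Int) from by ring]
    by_cases h1 : n ≤ c + 1 <;> by_cases h2 : n ≤ c + 1 + (rs.length : Int) <;>
      by_cases h3 : 1 ≤ (rs.length : Int) <;>
      simp [h1, h2] <;> omega
-- the counter value is irrelevant when the next tag is not a match (or the list ends)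
theorem hcmGo_reset (n : Int) (rest : List String)
    (h : ∀ r ∈ rest.head?, PySem.Str.startswith r "=" = false) (c : Int) :
    hcmGo n c rest = hcmGo n 0 rest := by
  cases rest with
  | nil => rfl
  | cons r rs =>
    have hr : PySem.Str.startswith r "=" = false := h r (by simp)
    simp only [hcmGo, hr, Bool.false_eq_true, if_false]

-- running A's loop over a block of consecutive non-match tags just resets the counter
theorem hcmGo_skip_run (n : Int) (run rest : List String)
    (h : ∀ s ∈ run, PySem.Str.startswith s "=" = false) (c : Int) (hne : run ≠ []) :
    hcmGo n c (run ++ rest) = hcmGo n 0 rest := by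
  induction run generalizing c with
  | nil => exact absurd rfl hne
  | cons t rs ih =>
    have ht : PySem.Str.startswith t "=" = false := h t (by simp)
    simp only [List.cons_append, hcmGo, ht, Bool.false_eq_true, if_false]
    cases rs with
    | nil => simp
    | cons u us =>
      exact ih (fun s hs => h s (by simp [hs])) 0 (by simp)

theorem hcmRuns_nil : hcmRuns [] = [] := by rw [hcmRuns]

theorem hcmRuns_cons (t : String) (ts : List String) :
    hcmRuns (t :: ts) =
      (PySem.Str.startswith t "=",
        1 + ((ts.takeWhile (fun s => PySem.Str.startswith s "=" == PySem.Str.startswith t "=")).length : Int))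
      :: hcmRuns (ts.dropWhile (fun s => PySem.Str.startswith s "=" == PySem.Str.startswith t "=")) := by
  rw [hcmRuns]

-- main lemma: A's scan equals B's runs-then-any, by strong induction on the list length
theorem hcmGo_eq_runs (n : Int) : ∀ (tags : List String),
    hcmGo n 0 tags = (hcmRuns tags).any (fun p => p.1 && decide (p.2 ≥ n)) := by
  intro tags
  induction hl : tags.length using Nat.strong_induction_on generalizing tags with
  | _ m ih =>
    cases tags with
    | nil => rw [hcmRuns_nil]; simp [hcmGo]
    | cons t ts =>
      set k := PySem.Str.startswith t "=" with hk
      set p : String → Bool := fun s => PySem.Str.startswith s "=" == k with hp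
      have hsplit : ts = ts.takeWhile p ++ ts.dropWhile p := (List.takeWhile_append_dropWhile).symm
      have hdroplen : (ts.dropWhile p).length ≤ ts.length := List.length_dropWhile_le p ts
      have hihdrop : hcmGo n 0 (ts.dropWhile p) =
          (hcmRuns (ts.dropWhile p)).any (fun q => q.1 && decide (q.2 ≥ n)) := by
        refine ih ((ts.dropWhile p).length) (by rw [List.length_cons] at hl; omega) _ rfl
      have hruns := hcmRuns_cons t ts
      rw [← hk, ← hp] at hruns
      have hheadd : ∀ r ∈ (ts.dropWhile p).head?, p r = false := by
        intro r hr
        have := List.head?_dropWhile_not p ts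
        rw [hr] at this
        simpa using this
      have hkey : ∀ r ∈ (ts.dropWhile p).head?, PySem.Str.startswith r "=" = !k := by
        intro r hr
        have hpr := hheadd r hr
        rw [hp] at hpr
        simp only [beq_eq_false_iff_ne, ne_eq] at hpr
        exact Bool.eq_not_of_ne hpr
      cases hkc : k with
      | true =>
        have ht : PySem.Str.startswith t "=" = true := by rw [← hk, hkc]
        have hall : ∀ s ∈ t :: ts.takeWhile p, PySem.Str.startswith s "=" = true := by
          intro s hs
          rcases List.mem_cons.1 hs with h | h
          · rw [h]; exact ht
          · have := List.mem_takeWhile_imp h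
            rw [hp] at this
            simp only [beq_iff_eq] at this
            rw [this, hkc]
        have hstep : hcmGo n 0 (t :: ts) = hcmGo n 0 ((t :: ts.takeWhile p) ++ ts.dropWhile p) := by
          rw [List.cons_append, ← hsplit]
        have hreset : hcmGo n (0 + ((t :: ts.takeWhile p).length : Int)) (ts.dropWhile p) =
            hcmGo n 0 (ts.dropWhile p) := by
          apply hcmGo_reset
          intro r hr
          have := hkey r hr
          rw [hkc] at this
          simpa using this
        rw [hstep, hcmGo_match_run n _ _ hall 0, hreset, hihdrop, hruns]
        simp only [List.any_cons, hkc, Bool.true_and, List.length_cons]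
        push_cast
        by_cases h2 : n ≤ ((ts.takeWhile p).length : Int) + 1 <;>
          simp [h2] <;> omega
      | false =>
        have hall : ∀ s ∈ t :: ts.takeWhile p, PySem.Str.startswith s "=" = false := by
          intro s hs
          rcases List.mem_cons.1 hs with h | h
          · rw [h, ← hk, hkc]
          · have := List.mem_takeWhile_imp h
            rw [hp] at this
            simp only [beq_iff_eq] at this
            rw [this, hkc]
        have hstep : hcmGo n 0 (t :: ts) = hcmGo n 0 ((t :: ts.takeWhile p) ++ ts.dropWhile p) := by
          rw [List.cons_append, ← hsplit]
        rw [hstep, hcmGo_skip_run n _ _ hall 0 (by simp), hihdrop, hruns]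
        simp [hkc]

-- ===== VERDICT (by name: the statement is the Claim_ definition above) =====
theorem has_consecutive_matches_spec : Claim_equal_has_consecutive_matches := by
  intro tags n _
  unfold Spec_has_consecutive_matches has_consecutive_matches has_consecutive_matches_alt
  exact hcmGo_eq_runs n tags
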